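-- pv_equiv track=rewrite | github.com/PondSec/marc_agent | server/task_manager.py | _pick_html_preview_entry
-- ===== SOURCE A (Python) =====
-- def _pick_html_preview_entry(display_paths: list[str]) -> str | None:
--     normalized = [path for path in display_paths if path.lower().endswith((".html", ".htm"))]
--     if not normalized:
--         return None
--     preferred = (
--         "index.html",
--         "public/index.html",
--         "src/index.html",
--     )
--     for candidate in preferred:
--         if candidate in normalized:
--             return candidate
--     for candidate in normalized:
--         if candidate.lower().endswith("/index.html"):
--             return candidate
--     return normalized[0]
-- ===== SOURCE B (Python) =====
-- def _pick_html_preview_entry(display_paths: list[str]) -> str | None: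
--     normalized = [path for path in display_paths if path.lower().endswith((".html", ".htm"))]
--     if not normalized:
--         return None
--
--     def rank(path: str) -> int:
--         if path == "index.html":
--             return 0
--         if path == "public/index.html":
--             return 1
--         if path == "src/index.html":
--             return 2
--         if path.lower().endswith("/index.html"):
--             return 3
--         return 4
--
--     return min(normalized, key=rank)
-- ===== Notes on version B (the rewrite author's own statement) =====
-- stated objective: alternative
-- what changed: Replaced A's three sequential membership scans plus a suffix scan plus fallback by a single keyed selection: a priority rank per path and one stable min(normalized, key=rank) pass.
import Mathlib
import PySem

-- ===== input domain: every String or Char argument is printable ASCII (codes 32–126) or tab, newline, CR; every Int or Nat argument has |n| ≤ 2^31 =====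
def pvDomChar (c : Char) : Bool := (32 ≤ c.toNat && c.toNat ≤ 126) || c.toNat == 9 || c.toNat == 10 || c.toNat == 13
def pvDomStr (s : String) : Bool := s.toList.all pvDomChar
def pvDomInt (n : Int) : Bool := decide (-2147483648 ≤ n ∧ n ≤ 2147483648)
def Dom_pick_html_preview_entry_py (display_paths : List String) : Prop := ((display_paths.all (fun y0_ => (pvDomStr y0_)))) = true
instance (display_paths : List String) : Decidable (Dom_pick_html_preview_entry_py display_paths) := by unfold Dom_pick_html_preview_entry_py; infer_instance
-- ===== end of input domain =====

-- B replaces A's three sequential priority scans by one keyed single-pass selection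
-- (min over a priority rank); same value everywhere (objective: alternative decomposition).

-- ===== PORT A =====
-- the shared filter predicate: path.lower().endswith((".html", ".htm"))
def pvIsHtml (p : String) : Bool :=
  PySem.Str.endswith (PySem.Str.lower p) ".html" || PySem.Str.endswith (PySem.Str.lower p) ".htm"

def pick_html_preview_entry_py (display_paths : List String) : Option String :=
  let normalized := display_paths.filter pvIsHtml
  if normalized.isEmpty then none
  else if normalized.contains "index.html" then some "index.html"
  else if normalized.contains "public/index.html" then some "public/index.html"
  else if normalized.contains "src/index.html" then some "src/index.html"
  else
    match normalized.find? (fun c => PySem.Str.endswith (PySem.Str.lower c) "/index.html") with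
    | some c => some c
    | none => PySem.List.pyGet? normalized 0

-- ===== PORT B =====
def pvRank (p : String) : Nat :=
  if p = "index.html" then 0
  else if p = "public/index.html" then 1
  else if p = "src/index.html" then 2
  else if PySem.Str.endswith (PySem.Str.lower p) "/index.html" then 3
  else 4

def pick_html_preview_entry_py_alt (display_paths : List String) : Option String :=
  let normalized := display_paths.filter pvIsHtml
  if normalized.isEmpty then none
  else PySem.List.min? normalized pvRank

-- ===== PRECONDITION & SPEC =====
def Spec_pick_html_preview_entry_py (display_paths : List String) (out : Option String) : Prop := out = pick_html_preview_entry_py_alt display_paths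
instance (display_paths : List String) (out : Option String) : Decidable (Spec_pick_html_preview_entry_py display_paths out) := by unfold Spec_pick_html_preview_entry_py; infer_instance

-- ===== CLAIM (what is proved, stated in full; the proofs are below) =====
def Claim_equal_pick_html_preview_entry_py : Prop := ∀ (display_paths : List String), Dom_pick_html_preview_entry_py display_paths → Spec_pick_html_preview_entry_py display_paths (pick_html_preview_entry_py display_paths)

-- ===== LEMMAS AND PROOFS =====

-- the fold step of PySem.List.min?
def pvStep (k : String → Nat) (acc : Option String) (x : String) : Option String :=
  match acc with
  | none => some x
  | some m => if k x < k m then some x else some m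

theorem pvMin?_eq_foldl (k : String → Nat) (l : List String) :
    PySem.List.min? l k = l.foldl (pvStep k) none := by
  unfold PySem.List.min?
  apply List.foldl_ext
  intro acc x _
  cases acc <;> rfl

theorem pvFoldlKeep (k : String → Nat) (t : List String) (m : String)
    (h : ∀ y ∈ t, k m ≤ k y) : t.foldl (pvStep k) (some m) = some m := by
  induction t with
  | nil => rfl
  | cons a t ih =>
    have ha := h a (by simp)
    simp only [List.foldl_cons, pvStep]
    rw [if_neg (by omega)]
    exact ih (fun y hy => h y (by simp [hy]))

theorem pvFoldlFirst (k : String → Nat) (t : List String) (m c : String) (r : Nat)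
    (hr : ∀ y ∈ t, r ≤ k y) (hm : r < k m)
    (hf : t.find? (fun y => k y == r) = some c) :
    t.foldl (pvStep k) (some m) = some c := by
  induction t generalizing m with
  | nil => simp at hf
  | cons a t ih =>
    have ha := hr a (by simp)
    by_cases hk : k a = r
    · rw [List.find?_cons_of_pos (p := fun y => k y == r) (by simpa using hk)] at hf
      injection hf with hf; subst hf
      simp only [List.foldl_cons, pvStep]
      rw [if_pos (by omega)]
      exact pvFoldlKeep k t a (fun y hy => by
        have := hr y (by simp [hy]); omega)
    · rw [List.find?_cons_of_neg (p := fun y => k y == r) (by simpa using hk)] at hf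
      have hr' : ∀ y ∈ t, r ≤ k y := fun y hy => hr y (by simp [hy])
      simp only [List.foldl_cons, pvStep]
      by_cases hlt : k a < k m
      · rw [if_pos hlt]; exact ih a hr' (by omega) hf
      · rw [if_neg hlt]; exact ih m hr' hm hf

theorem pvMinFirst (k : String → Nat) (l : List String) (c : String) (r : Nat)
    (hr : ∀ y ∈ l, r ≤ k y) (hf : l.find? (fun y => k y == r) = some c) :
    PySem.List.min? l k = some c := by
  cases l with
  | nil => simp at hf
  | cons a t =>
    rw [pvMin?_eq_foldl]
    simp only [List.foldl_cons, pvStep]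
    by_cases hk : k a = r
    · rw [List.find?_cons_of_pos (p := fun y => k y == r) (by simpa using hk)] at hf
      injection hf with hf; subst hf
      exact pvFoldlKeep k t a (fun y hy => by
        have := hr y (by simp [hy]); omega)
    · rw [List.find?_cons_of_neg (p := fun y => k y == r) (by simpa using hk)] at hf
      have ha := hr a (by simp)
      exact pvFoldlFirst k t a c r (fun y hy => hr y (by simp [hy])) (by omega) hf

theorem pvFind?Congr (p q : String → Bool) (l : List String)
    (h : ∀ y ∈ l, p y = q y) : l.find? p = l.find? q := by
  induction l with
  | nil => rfl
  | cons a t ih =>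
    have ha := h a (by simp)
    by_cases hq : q a = true
    · rw [List.find?_cons_of_pos (p := p) (ha ▸ hq), List.find?_cons_of_pos (p := q) hq]
    · have hq' : ¬ p a = true := ha ▸ hq
      rw [List.find?_cons_of_neg (p := p) hq', List.find?_cons_of_neg (p := q) hq]
      exact ih (fun y hy => h y (by simp [hy]))

theorem pvFind?Beq (l : List String) (x : String) (h : x ∈ l) :
    l.find? (fun y => y == x) = some x := by
  induction l with
  | nil => simp at h
  | cons a t ih =>
    by_cases hax : a = x
    · subst hax; rw [List.find?_cons_of_pos (p := fun y => y == a) (by simp)]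
    · rw [List.find?_cons_of_neg (p := fun y => y == x) (by simp [hax])]
      exact ih ((List.mem_cons.mp h).resolve_left fun he => hax he.symm)

-- ranks 0,1,2 are attained only by the corresponding preferred literal
theorem pvRank0 (y : String) : pvRank y = 0 ↔ y = "index.html" := by
  unfold pvRank; split_ifs <;> simp_all

theorem pvRank1 (y : String) : pvRank y = 1 ↔ y = "public/index.html" := by
  unfold pvRank; split_ifs <;> simp_all

theorem pvRank2 (y : String) : pvRank y = 2 ↔ y = "src/index.html" := by
  unfold pvRank; split_ifs <;> simp_all

theorem pvRankB0 (y : String) : (pvRank y == 0) = (y == "index.html") := by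
  by_cases h : pvRank y = 0
  · have hy := (pvRank0 y).mp h
    subst hy; decide
  · have hy : y ≠ "index.html" := fun hc => h ((pvRank0 y).mpr hc)
    simp [h, hy]

theorem pvRankB1 (y : String) : (pvRank y == 1) = (y == "public/index.html") := by
  by_cases h : pvRank y = 1
  · have hy := (pvRank1 y).mp h
    subst hy; decide
  · have hy : y ≠ "public/index.html" := fun hc => h ((pvRank1 y).mpr hc)
    simp [h, hy]

theorem pvRankB2 (y : String) : (pvRank y == 2) = (y == "src/index.html") := by
  by_cases h : pvRank y = 2
  · have hy := (pvRank2 y).mp h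
    subst hy; decide
  · have hy : y ≠ "src/index.html" := fun hc => h ((pvRank2 y).mpr hc)
    simp [h, hy]

-- core equality on the already-filtered list
theorem pvCore (l : List String) (hl : ¬ l.isEmpty = true) :
    (if l.contains "index.html" then some "index.html"
     else if l.contains "public/index.html" then some "public/index.html"
     else if l.contains "src/index.html" then some "src/index.html"
     else
       match l.find? (fun c => PySem.Str.endswith (PySem.Str.lower c) "/index.html") with
       | some c => some c
       | none => PySem.List.pyGet? l 0) = PySem.List.min? l pvRank := by
  by_cases h0 : "index.html" ∈ l
  · rw [if_pos (by simpa using h0)]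
    refine (pvMinFirst pvRank l _ 0 (fun y _ => Nat.zero_le _) ?_).symm
    rw [pvFind?Congr _ (fun y => y == "index.html") l (fun y _ => pvRankB0 y)]
    exact pvFind?Beq l _ h0
  · rw [if_neg (by simpa using h0)]
    have hr0 : ∀ y ∈ l, 1 ≤ pvRank y := by
      intro y hy
      by_contra hc
      have h' : pvRank y = 0 := by omega
      exact h0 (((pvRank0 y).mp h') ▸ hy)
    by_cases h1 : "public/index.html" ∈ l
    · rw [if_pos (by simpa using h1)]
      refine (pvMinFirst pvRank l _ 1 hr0 ?_).symm
      rw [pvFind?Congr _ (fun y => y == "public/index.html") l (fun y _ => pvRankB1 y)]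
      exact pvFind?Beq l _ h1
    · rw [if_neg (by simpa using h1)]
      have hr1 : ∀ y ∈ l, 2 ≤ pvRank y := by
        intro y hy
        by_contra hc
        have h' : pvRank y = 1 := by have := hr0 y hy; omega
        exact h1 (((pvRank1 y).mp h') ▸ hy)
      by_cases h2 : "src/index.html" ∈ l
      · rw [if_pos (by simpa using h2)]
        refine (pvMinFirst pvRank l _ 2 hr1 ?_).symm
        rw [pvFind?Congr _ (fun y => y == "src/index.html") l (fun y _ => pvRankB2 y)]
        exact pvFind?Beq l _ h2
      · rw [if_neg (by simpa using h2)]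
        have hr2 : ∀ y ∈ l, 3 ≤ pvRank y := by
          intro y hy
          by_contra hc
          have h' : pvRank y = 2 := by have := hr1 y hy; omega
          exact h2 (((pvRank2 y).mp h') ▸ hy)
        have hrank3 : ∀ y ∈ l,
            ((pvRank y == 3) : Bool) = PySem.Str.endswith (PySem.Str.lower y) "/index.html" := by
          intro y hy
          have hy0 : y ≠ "index.html" := fun h => h0 (h ▸ hy)
          have hy1 : y ≠ "public/index.html" := fun h => h1 (h ▸ hy)
          have hy2 : y ≠ "src/index.html" := fun h => h2 (h ▸ hy)
          unfold pvRank
          rw [if_neg hy0, if_neg hy1, if_neg hy2]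
          cases hs : PySem.Str.endswith (PySem.Str.lower y) "/index.html" <;> simp
        cases hfind : l.find? (fun c => PySem.Str.endswith (PySem.Str.lower c) "/index.html") with
        | some c =>
          refine (pvMinFirst pvRank l c 3 hr2 ?_).symm
          rw [pvFind?Congr _ (fun c => PySem.Str.endswith (PySem.Str.lower c) "/index.html") l hrank3]
          exact hfind
        | none =>
          have hall : ∀ y ∈ l, pvRank y = 4 := by
            intro y hy
            have hne := List.find?_eq_none.mp hfind y hy
            have := hrank3 y hy
            have h3 : pvRank y ≠ 3 := by
              intro hc; rw [hc] at this; simp at this; exact hne (by simpa using this.symm)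
            have := hr2 y hy
            have h4 : pvRank y ≤ 4 := by unfold pvRank; split_ifs <;> omega
            omega
          cases l with
          | nil => simp at hl
          | cons a t =>
            rw [pvMin?_eq_foldl]
            simp only [List.foldl_cons, pvStep]
            rw [pvFoldlKeep pvRank t a (fun y hy => by
              have := hall y (by simp [hy]); have := hall a (by simp); omega)]
            simp [PySem.List.pyGet?, PySem.List.pyIdx?]

-- ===== VERDICT (by name: the statement is the Claim_ definition above) =====
theorem pick_html_preview_entry_py_spec : Claim_equal_pick_html_preview_entry_py := by
  intro dps _
  unfold Spec_pick_html_preview_entry_py pick_html_preview_entry_py pick_html_preview_entry_py_alt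
  set l := dps.filter pvIsHtml with hl
  by_cases he : l.isEmpty = true
  · simp [he]
  · rw [if_neg he, if_neg he]
    exact pvCore l he
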